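-- pv_equiv track=rewrite | github.com/AvishKaushik/c9-scout-api | category2-scouting-report/app/services/composition_tracker.py | _classify_lol_comp
-- ===== SOURCE A (Python) =====
-- def _classify_lol_comp(champions: list[str]) -> str:
--     """Classify LoL team composition type."""
--     # Simplified classification based on common archetypes
--     engage_champs = ["Ornn", "Malphite", "Leona", "Nautilus", "Sejuani"]
--     poke_champs = ["Jayce", "Nidalee", "Xerath", "Zoe", "Varus"]
--     split_champs = ["Fiora", "Jax", "Tryndamere", "Camille"]
--
--     engage_count = sum(1 for c in champions if c in engage_champs)
--     poke_count = sum(1 for c in champions if c in poke_champs)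
--     split_count = sum(1 for c in champions if c in split_champs)
--
--     if engage_count >= 2:
--         return "Teamfight/Engage"
--     elif poke_count >= 2:
--         return "Poke/Siege"
--     elif split_count >= 1:
--         return "Split-push"
--     else:
--         return "Standard/Skirmish"
-- ===== SOURCE B (Python) =====
-- _ARCHETYPE = {name: tag for tag, names in (
--     ("engage", ["Ornn", "Malphite", "Leona", "Nautilus", "Sejuani"]),
--     ("poke", ["Jayce", "Nidalee", "Xerath", "Zoe", "Varus"]),
--     ("split", ["Fiora", "Jax", "Tryndamere", "Camille"]),
-- ) for name in names}
--
--
-- def _classify_lol_comp(champions: list[str]) -> str: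
--     """Classify LoL team composition type (single pass over an archetype index)."""
--     engage = poke = split = 0
--     for c in champions:
--         tag = _ARCHETYPE.get(c)
--         if tag == "engage":
--             engage += 1
--         elif tag == "poke":
--             poke += 1
--         elif tag == "split":
--             split += 1
--     if engage >= 2:
--         return "Teamfight/Engage"
--     if poke >= 2:
--         return "Poke/Siege"
--     if split >= 1:
--         return "Split-push"
--     return "Standard/Skirmish"
-- ===== Notes on version B (the rewrite author's own statement) =====
-- stated objective: alternative
-- what changed: Three separate membership-scan counting passes are replaced by one pass over the champions that classifies each name through a precomputed name-to-archetype dictionary and maintains the three counters together; the threshold ladder is unchanged.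
import Mathlib
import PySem

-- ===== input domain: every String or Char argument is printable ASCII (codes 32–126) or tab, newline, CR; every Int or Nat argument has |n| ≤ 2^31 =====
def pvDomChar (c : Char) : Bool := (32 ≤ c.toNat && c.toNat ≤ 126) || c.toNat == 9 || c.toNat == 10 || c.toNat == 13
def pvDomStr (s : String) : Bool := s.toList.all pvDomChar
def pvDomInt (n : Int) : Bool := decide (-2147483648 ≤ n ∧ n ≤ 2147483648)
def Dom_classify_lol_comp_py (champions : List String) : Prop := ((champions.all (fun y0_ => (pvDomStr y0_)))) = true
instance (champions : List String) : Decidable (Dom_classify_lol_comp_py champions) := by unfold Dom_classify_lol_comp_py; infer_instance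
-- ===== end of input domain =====

-- B replaces A's three membership-scan counting passes by a single pass over the
-- champions that classifies each name via a precomputed name→archetype dictionary
-- (objective: alternative decomposition, same threshold ladder).

-- ===== PORT A =====
def engage_champs : List String := ["Ornn", "Malphite", "Leona", "Nautilus", "Sejuani"]
def poke_champs : List String := ["Jayce", "Nidalee", "Xerath", "Zoe", "Varus"]
def split_champs : List String := ["Fiora", "Jax", "Tryndamere", "Camille"]

def classify_lol_comp_py (champions : List String) : String :=
  let engage_count : Int :=
    champions.foldl (fun acc c => if engage_champs.contains c then acc + 1 else acc) 0
  let poke_count : Int :=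
    champions.foldl (fun acc c => if poke_champs.contains c then acc + 1 else acc) 0
  let split_count : Int :=
    champions.foldl (fun acc c => if split_champs.contains c then acc + 1 else acc) 0
  if engage_count ≥ 2 then "Teamfight/Engage"
  else if poke_count ≥ 2 then "Poke/Siege"
  else if split_count ≥ 1 then "Split-push"
  else "Standard/Skirmish"

-- ===== PORT B =====
-- the module-level dict comprehension _ARCHETYPE of Source B
def pvArchetype : PySem.Dict String String := PySem.Dict.ofList
  [("Ornn", "engage"), ("Malphite", "engage"), ("Leona", "engage"),
   ("Nautilus", "engage"), ("Sejuani", "engage"),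
   ("Jayce", "poke"), ("Nidalee", "poke"), ("Xerath", "poke"),
   ("Zoe", "poke"), ("Varus", "poke"),
   ("Fiora", "split"), ("Jax", "split"), ("Tryndamere", "split"),
   ("Camille", "split")]

-- the loop body of Source B: tag = _ARCHETYPE.get(c); if/elif chain on tag
def classify_step (acc : Int × Int × Int) (c : String) : Int × Int × Int :=
  let tag := PySem.Dict.get? pvArchetype c
  if tag = some "engage" then (acc.1 + 1, acc.2.1, acc.2.2)
  else if tag = some "poke" then (acc.1, acc.2.1 + 1, acc.2.2)
  else if tag = some "split" then (acc.1, acc.2.1, acc.2.2 + 1)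
  else acc

def classify_lol_comp_py_alt (champions : List String) : String :=
  let counts := champions.foldl classify_step ((0 : Int), (0 : Int), (0 : Int))
  if counts.1 ≥ 2 then "Teamfight/Engage"
  else if counts.2.1 ≥ 2 then "Poke/Siege"
  else if counts.2.2 ≥ 1 then "Split-push"
  else "Standard/Skirmish"

-- ===== PRECONDITION & SPEC =====
def Spec_classify_lol_comp_py (champions : List String) (out : String) : Prop := out = classify_lol_comp_py_alt champions
instance (champions : List String) (out : String) : Decidable (Spec_classify_lol_comp_py champions out) := by unfold Spec_classify_lol_comp_py; infer_instance

-- ===== CLAIM (what is proved, stated in full; the proofs are below) =====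
def Claim_equal_classify_lol_comp_py : Prop := ∀ (champions : List String), Dom_classify_lol_comp_py champions → Spec_classify_lol_comp_py champions (classify_lol_comp_py champions)

-- ===== LEMMAS AND PROOFS =====

-- B's one step updates the three counters exactly as A's three per-element tests do.
lemma classify_step_eq (acc : Int × Int × Int) (c : String) :
    classify_step acc c =
      ((if engage_champs.contains c then acc.1 + 1 else acc.1),
       (if poke_champs.contains c then acc.2.1 + 1 else acc.2.1),
       (if split_champs.contains c then acc.2.2 + 1 else acc.2.2)) := by
  by_cases h1 : c = "Ornn"; · subst h1; rfl
  by_cases h2 : c = "Malphite"; · subst h2; rfl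
  by_cases h3 : c = "Leona"; · subst h3; rfl
  by_cases h4 : c = "Nautilus"; · subst h4; rfl
  by_cases h5 : c = "Sejuani"; · subst h5; rfl
  by_cases h6 : c = "Jayce"; · subst h6; rfl
  by_cases h7 : c = "Nidalee"; · subst h7; rfl
  by_cases h8 : c = "Xerath"; · subst h8; rfl
  by_cases h9 : c = "Zoe"; · subst h9; rfl
  by_cases h10 : c = "Varus"; · subst h10; rfl
  by_cases h11 : c = "Fiora"; · subst h11; rfl
  by_cases h12 : c = "Jax"; · subst h12; rfl
  by_cases h13 : c = "Tryndamere"; · subst h13; rfl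
  by_cases h14 : c = "Camille"; · subst h14; rfl
  have hmk : pvArchetype = PySem.Dict.mk
      [("Ornn", "engage"), ("Malphite", "engage"), ("Leona", "engage"),
       ("Nautilus", "engage"), ("Sejuani", "engage"),
       ("Jayce", "poke"), ("Nidalee", "poke"), ("Xerath", "poke"),
       ("Zoe", "poke"), ("Varus", "poke"),
       ("Fiora", "split"), ("Jax", "split"), ("Tryndamere", "split"),
       ("Camille", "split")] := by decide
  have hget : PySem.Dict.get? pvArchetype c = none := by
    rw [hmk]
    simp [PySem.Dict.get?_mk_cons, Ne.symm h1, Ne.symm h2, Ne.symm h3,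
      Ne.symm h4, Ne.symm h5, Ne.symm h6, Ne.symm h7, Ne.symm h8, Ne.symm h9,
      Ne.symm h10, Ne.symm h11, Ne.symm h12, Ne.symm h13, Ne.symm h14]
    rfl
  simp [classify_step, hget, engage_champs, poke_champs, split_champs,
    h1, h2, h3, h4, h5, h6, h7, h8, h9, h10, h11, h12, h13, h14]

-- B's single fold computes all three of A's counting folds at once.
lemma classify_fold_eq : ∀ (l : List String) (e p s : Int),
    l.foldl classify_step (e, p, s) =
      (l.foldl (fun acc c => if engage_champs.contains c then acc + 1 else acc) e,
       l.foldl (fun acc c => if poke_champs.contains c then acc + 1 else acc) p,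
       l.foldl (fun acc c => if split_champs.contains c then acc + 1 else acc) s)
  | [], _, _, _ => rfl
  | c :: t, e, p, s => by
      simp only [List.foldl_cons, classify_step_eq]
      exact classify_fold_eq t _ _ _

-- ===== VERDICT (by name: the statement is the Claim_ definition above) =====
theorem classify_lol_comp_py_spec : Claim_equal_classify_lol_comp_py := by
  intro champions _
  unfold Spec_classify_lol_comp_py classify_lol_comp_py classify_lol_comp_py_alt
  rw [classify_fold_eq]
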